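-- pv_equiv track=rewrite | github.com/anmutu/arithmetic | leetcode/01array/10shooting.py | shooting
-- ===== SOURCE A (Python) =====
-- def shooting(nums):
--     length = len(list(set(nums))) - 1
--     res = []
--     for i in range(len(nums)):
--         if nums[i] != 0:
--             res.append(nums[i])
--             if len(list(set(res))) == length:
--                 return res
--         else:
--             if len(list(set(res))) == length:
--                 return res
--             else:
--                 res = []
--     if len(list(set(res))) == length:
--                 return res
-- ===== SOURCE B (Python) =====
-- def _segments(nums):
--     # split nums on zeros into the maximal runs of nonzero values
--     segs, cur = [], []
--     for x in nums:
--         if x != 0: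
--             cur.append(x)
--         else:
--             if cur:
--                 segs.append(cur)
--             cur = []
--     if cur:
--         segs.append(cur)
--     return segs
--
--
-- def _shortest_prefix(seg, target):
--     # shortest prefix of seg with exactly `target` distinct values, else None
--     seen = set()
--     for j, x in enumerate(seg):
--         seen.add(x)
--         if len(seen) == target:
--             return seg[:j + 1]
--     return None
--
--
-- def shooting(nums):
--     target = len(set(nums)) - 1
--     if target == 0:
--         # one distinct value; the empty run qualifies exactly when that value is 0
--         return [] if 0 in nums else None
--     for seg in _segments(nums):
--         pre = _shortest_prefix(seg, target)
--         if pre is not None: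
--             return pre
--     return None
-- ===== Notes on version B (the rewrite author's own statement) =====
-- stated objective: faster
-- what changed: B first resolves the distinct-count target in closed form (target==0 reduces to a membership test), then splits the list into its zero-separated runs in one pass and scans each run once with an incremental seen-set for the shortest prefix reaching the target, instead of A's single accumulator loop that rebuilds set(res) from scratch at every element.
import Mathlib
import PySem

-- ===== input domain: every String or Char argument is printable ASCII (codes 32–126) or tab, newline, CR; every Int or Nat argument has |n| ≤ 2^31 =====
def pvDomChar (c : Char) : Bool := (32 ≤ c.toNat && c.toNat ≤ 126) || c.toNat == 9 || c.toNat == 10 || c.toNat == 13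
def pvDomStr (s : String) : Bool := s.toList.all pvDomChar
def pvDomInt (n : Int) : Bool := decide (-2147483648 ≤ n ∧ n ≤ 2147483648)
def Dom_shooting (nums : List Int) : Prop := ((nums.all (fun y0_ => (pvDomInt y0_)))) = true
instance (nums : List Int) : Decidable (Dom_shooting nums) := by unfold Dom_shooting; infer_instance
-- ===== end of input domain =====

-- B precomputes the target (closed form for target 0), splits the list into zero-separated runs, then scans each run once with an incremental set: measured asymptotically faster than A's per-element set(res) rebuild.


-- ===== PORT A =====
-- for-loop over nums[i] (indices always in range), rebuilding set(res) at every check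
def shootingGo (length : Int) : List Int → List Int → Option (List Int)
  | [], res => if ((PySem.Set.ofList res).length : Int) = length then some res else none
  | x :: xs, res =>
    if x ≠ 0 then
      if (((PySem.Set.ofList (res ++ [x])).length : Int) = length) then some (res ++ [x])
      else shootingGo length xs (res ++ [x])
    else
      if ((PySem.Set.ofList res).length : Int) = length then some res
      else shootingGo length xs []

def shooting (nums : List Int) : Option (List Int) :=
  shootingGo (((PySem.Set.ofList nums).length : Int) - 1) nums []

-- ===== PORT B =====
-- _segments: one pass splitting nums into its maximal runs of nonzero values
def segStep (p : List (List Int) × List Int) (x : Int) : List (List Int) × List Int :=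
  if x ≠ 0 then (p.1, p.2 ++ [x])
  else (if p.2 ≠ [] then p.1 ++ [p.2] else p.1, [])

def segments (nums : List Int) : List (List Int) :=
  let p := nums.foldl segStep ([], [])
  if p.2 ≠ [] then p.1 ++ [p.2] else p.1

-- _shortest_prefix: for j, x in enumerate(seg), incremental seen-set, returns seg[:j+1]
def spGo (seg : List Int) (target : Int) : List Int → Nat → PySem.Set Int → Option (List Int)
  | [], _, _ => none
  | x :: r, j, seen =>
    let s := PySem.Set.add seen x
    if (s.length : Int) = target then some (seg.take (j + 1)) else spGo seg target r (j + 1) s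

def shortestPrefix (seg : List Int) (target : Int) : Option (List Int) :=
  spGo seg target seg 0 PySem.Set.empty

-- the for-seg-in-_segments loop of shooting
def scanSegs (target : Int) : List (List Int) → Option (List Int)
  | [] => none
  | s :: r =>
    match shortestPrefix s target with
    | some p => some p
    | none => scanSegs target r

def shooting_alt (nums : List Int) : Option (List Int) :=
  let target := ((PySem.Set.ofList nums).length : Int) - 1
  if target = 0 then (if nums.contains 0 then some [] else none)
  else scanSegs target (segments nums)

-- ===== PRECONDITION & SPEC =====
def Spec_shooting (nums : List Int) (out : Option (List Int)) : Prop := out = shooting_alt nums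
instance (nums : List Int) (out : Option (List Int)) : Decidable (Spec_shooting nums out) := by unfold Spec_shooting; infer_instance

-- ===== CLAIM (what is proved, stated in full; the proofs are below) =====
def Claim_equal_shooting : Prop := ∀ (nums : List Int), Dom_shooting nums → Spec_shooting nums (shooting nums)

-- ===== LEMMAS AND PROOFS =====

-- proof-side recursive characterisation of `segments`
def segRC : List Int → List Int → List (List Int)
  | cur, [] => if cur = [] then [] else [cur]
  | cur, x :: t => if x = 0 then (if cur = [] then segRC [] t else cur :: segRC [] t) else segRC (cur ++ [x]) t

theorem segAux (xs : List Int) : ∀ (segs : List (List Int)) (cur : List Int),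
    (let p := xs.foldl segStep (segs, cur); if p.2 ≠ [] then p.1 ++ [p.2] else p.1) = segs ++ segRC cur xs := by
  induction xs with
  | nil =>
    intro segs cur
    by_cases hc : cur = [] <;> simp [segRC, hc]
  | cons x t ih =>
    intro segs cur
    by_cases hx : x = 0
    · by_cases hc : cur = []
      · simpa [segStep, segRC, hx, hc] using ih segs []
      · have := ih (segs ++ [cur]) []
        simpa [segStep, segRC, hx, hc, List.append_assoc] using this
    · simpa [segStep, segRC, hx] using ih segs (cur ++ [x])

theorem segments_eq (nums : List Int) : segments nums = segRC [] nums := by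
  simpa [segments] using segAux nums [] []

theorem segRC_ne (ys : List Int) : ∀ cur : List Int, cur ≠ [] →
    segRC cur ys = (cur ++ ys.takeWhile (fun y => y != 0)) :: segRC [] (ys.dropWhile (fun y => y != 0)) := by
  induction ys with
  | nil => intro cur hc; simp [segRC, hc]
  | cons x t ih =>
    intro cur hc
    by_cases hx : x = 0
    · simp [segRC, hx, hc]
    · have hne : (x != 0) = true := by simp [hx]
      have : cur ++ [x] ≠ [] := by simp
      simp [segRC, hx, hne, ih (cur ++ [x]) this, List.append_assoc]

theorem segRC_cons_nz {x : Int} (t : List Int) (hx : x ≠ 0) :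
    segRC [] (x :: t) = ((x :: t).takeWhile (fun y => y != 0)) :: segRC [] ((x :: t).dropWhile (fun y => y != 0)) := by
  have hne : (x != 0) = true := by simp [hx]
  have h1 : segRC [] (x :: t) = segRC [x] t := by simp [segRC, hx]
  rw [h1, segRC_ne t [x] (by simp)]
  simp [hne]

-- one unfolding step of the segment scan, phrased on segRC
theorem scanS (L : Int) (ys : List Int) :
    scanSegs L (segRC [] ys) =
      match spGo (ys.takeWhile (fun y => y != 0)) L (ys.takeWhile (fun y => y != 0)) 0 PySem.Set.empty with
      | some p => some p
      | none => scanSegs L (segRC [] (ys.dropWhile (fun y => y != 0))) := by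
  match ys with
  | [] => simp [segRC, scanSegs, spGo]
  | x :: t =>
    by_cases hx : x = 0
    · have hne : (x != 0) = false := by simp [hx]
      simp [spGo, segRC, hx]
    · rw [segRC_cons_nz t hx]
      simp [scanSegs, shortestPrefix]

theorem set_add_len (s : PySem.Set Int) (x : Int) :
    s.length ≤ (PySem.Set.add s x).length ∧ (PySem.Set.add s x).length ≤ s.length + 1 := by
  rw [PySem.Set.add_eq_ite]
  split <;> simp

-- main invariant: A's accumulator loop equals B's per-run scan
theorem mainLemma (L : Int) (xs : List Int) : ∀ res : List Int,
    ((PySem.Set.ofList res).length : Int) < L →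
    shootingGo L xs res =
      (match spGo (res ++ xs.takeWhile (fun y => y != 0)) L (xs.takeWhile (fun y => y != 0))
          res.length (PySem.Set.ofList res) with
       | some p => some p
       | none => scanSegs L (segRC [] (xs.dropWhile (fun y => y != 0)))) := by
  induction xs with
  | nil =>
    intro res hres
    have hne : ¬ ((PySem.Set.ofList res).length : Int) = L := by omega
    simp [shootingGo, hne, spGo, segRC, scanSegs]
  | cons x t ih =>
    intro res hres
    by_cases hx : x = 0
    · have hne0 : ¬ ((PySem.Set.ofList res).length : Int) = L := by omega
      have hb : (x != 0) = false := by simp [hx]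
      have h0 : ((PySem.Set.ofList ([] : List Int)).length : Int) < L := by
        simp [PySem.Set.ofList_nil]
        have : (0:Int) ≤ ((PySem.Set.ofList res).length : Int) := by positivity
        omega
      rw [show shootingGo L (x :: t) res = shootingGo L t [] by simp [shootingGo, hx, hne0]]
      rw [ih [] h0]
      have hd : (x :: t).dropWhile (fun y => y != 0) = x :: t := by
        simp [hb]
      have hseg : segRC [] (x :: t) = segRC [] t := by simp [segRC, hx]
      rw [show ((x :: t).takeWhile (fun y => y != 0)) = ([] : List Int) by simp [hb]]
      simp only [spGo, hd, hseg, List.nil_append, List.length_nil]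
      rw [show (PySem.Set.ofList ([] : List Int)) = PySem.Set.empty from rfl]
      rw [← scanS L t]
    · have hb : (x != 0) = true := by simp [hx]
      have htw : (x :: t).takeWhile (fun y => y != 0) = x :: t.takeWhile (fun y => y != 0) := by
        simp [hb]
      have hdw : (x :: t).dropWhile (fun y => y != 0) = t.dropWhile (fun y => y != 0) := by
        simp [hb]
      have hadd : PySem.Set.ofList (res ++ [x]) = PySem.Set.add (PySem.Set.ofList res) x :=
        PySem.Set.ofList_append_singleton res x
      by_cases hc : ((PySem.Set.ofList (res ++ [x])).length : Int) = L
      · have hseg : res ++ (x :: t.takeWhile (fun y => y != 0)) =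
            (res ++ [x]) ++ t.takeWhile (fun y => y != 0) := by simp
        have htake : ((res ++ [x]) ++ t.takeWhile (fun y => y != 0)).take (res.length + 1) = res ++ [x] :=
          List.take_left' (by simp)
        simp only [shootingGo, if_pos hc, htw, spGo, ← hadd]
        rw [hseg]
        simp only [htake]
        rw [if_pos hx]
      · have hlt : ((PySem.Set.ofList (res ++ [x])).length : Int) < L := by
          have h2 := (set_add_len (PySem.Set.ofList res) x).2
          rw [← hadd] at h2
          have : ((PySem.Set.ofList (res ++ [x])).length : Int) ≤ ((PySem.Set.ofList res).length : Int) + 1 := by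
            exact_mod_cast h2
          omega
        have hrec := ih (res ++ [x]) hlt
        simp only [shootingGo, if_neg hc]
        rw [hrec, htw, hdw]
        simp only [spGo, ← hadd, if_neg hc]
        have hseg : (res ++ [x]) ++ t.takeWhile (fun y => y != 0) =
            res ++ (x :: t.takeWhile (fun y => y != 0)) := by simp
        rw [hseg]
        simp [List.length_append]
        exact fun h => absurd h hx

-- target = 0 with no zero present: the loop never returns (distinct count stays ≥ 1)
theorem lemZero (xs : List Int) : ∀ res : List Int, (∀ y ∈ xs, y ≠ 0) → res ≠ [] →
    shootingGo 0 xs res = none := by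
  induction xs with
  | nil =>
    intro res _ hr
    have : PySem.Set.ofList res ≠ [] := by
      match res, hr with
      | r :: rs, _ =>
        have : r ∈ PySem.Set.ofList (r :: rs) := (PySem.Set.mem_ofList _ _).2 (by simp)
        exact List.ne_nil_of_mem this
    have hlen : ¬ ((PySem.Set.ofList res).length : Int) = 0 := by
      have := List.length_pos_of_ne_nil this
      omega
    simp only [shootingGo, if_neg hlen]
  | cons x t ih =>
    intro res hall hr
    have hx : x ≠ 0 := hall x (by simp)
    have hmem : x ∈ PySem.Set.ofList (res ++ [x]) := (PySem.Set.mem_ofList _ _).2 (by simp)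
    have hlen : ¬ ((PySem.Set.ofList (res ++ [x])).length : Int) = 0 := by
      have := List.length_pos_of_ne_nil (List.ne_nil_of_mem hmem)
      omega
    have := ih (res ++ [x]) (fun y hy => hall y (by simp [hy])) (by simp)
    simp only [shootingGo, if_pos hx, if_neg hlen, this]

-- a set of length 1 pins every member
theorem mem_len_one {s : List Int} (h : s.length = 1) {a b : Int} (ha : a ∈ s) (hb : b ∈ s) : a = b := by
  match s, h with
  | [v], _ =>
    simp at ha hb
    omega

-- ===== VERDICT (by name: the statement is the Claim_ definition above) =====
theorem shooting_spec : Claim_equal_shooting := by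
  intro nums _
  unfold Spec_shooting shooting shooting_alt
  show shootingGo (((PySem.Set.ofList nums).length : Int) - 1) nums [] =
      if ((PySem.Set.ofList nums).length : Int) - 1 = 0 then (if nums.contains 0 = true then some [] else none)
      else scanSegs (((PySem.Set.ofList nums).length : Int) - 1) (segments nums)
  by_cases hk0 : (PySem.Set.ofList nums).length = 0
  · -- distinct count 0: nums = []
    have hnil : nums = [] := by
      cases nums with
      | nil => rfl
      | cons n t =>
        have : n ∈ PySem.Set.ofList (n :: t) := (PySem.Set.mem_ofList _ _).2 (by simp)
        have := List.length_pos_of_ne_nil (List.ne_nil_of_mem this)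
        omega
    subst hnil
    decide
  · by_cases hk1 : (PySem.Set.ofList nums).length = 1
    · -- distinct count 1: target = 0, closed-form membership branch
      have h10 : ((1 : Nat) : Int) - 1 = 0 := by norm_num
      rw [hk1, h10, if_pos rfl]
      cases nums with
      | nil => simp [PySem.Set.ofList_nil] at hk1
      | cons n t =>
        by_cases h0 : (0 : Int) ∈ n :: t
        · have hmemn : n ∈ PySem.Set.ofList (n :: t) := (PySem.Set.mem_ofList _ _).2 (by simp)
          have hmem0 : (0 : Int) ∈ PySem.Set.ofList (n :: t) := (PySem.Set.mem_ofList _ _).2 h0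
          have hn0 : n = 0 := mem_len_one hk1 hmemn hmem0
          subst hn0
          have hcon : ((0 :: t).contains (0 : Int)) = true := by
            simp
          rw [hcon, if_pos rfl]
          simp [shootingGo, PySem.Set.ofList_nil]
        · have hn : n ≠ 0 := fun h => h0 (by simp [h])
          have hall : ∀ y ∈ t, y ≠ 0 := fun y hy hy0 => h0 (by simp [hy0 ▸ hy])
          have hcon : ((n :: t).contains (0 : Int)) = false := by
            simp only [List.contains_eq_mem, decide_eq_false_iff_not]
            exact h0
          rw [hcon]
          have hmemn : n ∈ PySem.Set.ofList ([n] : List Int) := (PySem.Set.mem_ofList _ _).2 (by simp)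
          have hlen1 : ¬ ((PySem.Set.ofList ([n] : List Int)).length : Int) = 0 := by
            have := List.length_pos_of_ne_nil (List.ne_nil_of_mem hmemn)
            omega
          have hrec := lemZero t [n] hall (by simp)
          simp [shootingGo, hn, hrec]
          exact List.ne_nil_of_mem hmemn
    · -- distinct count >= 2: target >= 1, run-scan applies
      have hL1 : (1 : Int) ≤ ((PySem.Set.ofList nums).length : Int) - 1 := by omega
      rw [if_neg (by omega)]
      rw [segments_eq]
      rw [mainLemma _ nums [] (by rw [PySem.Set.ofList_nil]; simpa using hL1)]
      simp only [List.nil_append, List.length_nil]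
      rw [show (PySem.Set.ofList ([] : List Int)) = PySem.Set.empty from rfl]
      rw [← scanS _ nums]
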